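-- pv_equiv track=rewrite | github.com/biasedLiar/Idatt_2502_Iterated_Prisoners_Dilemma | train/algorithms/sigmoids.py | get_last_x_moves
-- ===== SOURCE A (Python) =====
-- def get_last_x_moves(history, turn, mem_len):
--     new_hist = [-1] * mem_len
--     if turn < mem_len:
--         for i in range(turn):
--             new_hist[mem_len - i - 1] = history[turn - i - 1]
--     else:
--         for i in range(mem_len):
--             new_hist[mem_len - i - 1] = history[turn - i - 1]
--     return new_hist
-- ===== SOURCE B (Python) =====
-- def get_last_x_moves(history, turn, mem_len):
--     out = []
--     for j in range(turn - mem_len, turn):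
--         out.append(history[j] if j >= 0 else -1)
--     return out
-- ===== Notes on version B (the rewrite author's own statement) =====
-- stated objective: simpler
-- what changed: Replaces A's pre-allocated [-1]*mem_len array, the if/else on turn<mem_len and the two backward index-by-index back-fill loops by one uniform forward pass over the absolute indices range(turn-mem_len, turn), deciding each element locally (history[j] if j>=0 else -1) and appending; no clamp, no pad count, no case split.
-- outside the precondition, e.g. on get_last_x_moves([0], 2, 2): A raises IndexError, B raises IndexError
import Mathlib
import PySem

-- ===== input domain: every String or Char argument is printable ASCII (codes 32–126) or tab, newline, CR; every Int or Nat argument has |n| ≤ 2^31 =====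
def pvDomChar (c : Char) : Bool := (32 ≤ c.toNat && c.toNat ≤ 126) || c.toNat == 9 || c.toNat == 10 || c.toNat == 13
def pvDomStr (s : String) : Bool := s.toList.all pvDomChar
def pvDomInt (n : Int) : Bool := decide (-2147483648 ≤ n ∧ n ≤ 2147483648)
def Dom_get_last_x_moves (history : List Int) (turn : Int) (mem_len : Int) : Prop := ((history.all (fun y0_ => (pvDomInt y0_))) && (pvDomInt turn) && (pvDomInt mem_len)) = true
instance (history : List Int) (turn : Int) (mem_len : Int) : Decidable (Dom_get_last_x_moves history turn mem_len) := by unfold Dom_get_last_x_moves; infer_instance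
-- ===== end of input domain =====

-- B replaces A's pre-allocated array, its if/else on turn<mem_len and its two backward back-fill loops
-- by one uniform forward pass over the absolute indices range(turn-mem_len, turn), deciding each element
-- locally (history[j] if j>=0 else -1) and appending (objective: simpler).


-- ===== PORT A =====
def get_last_x_moves (history : List Int) (turn : Int) (mem_len : Int) : List Int :=
  let new_hist : List Int := List.replicate mem_len.toNat (-1)
  if turn < mem_len then
    (PySem.List.pyRange 0 turn 1).foldl
      (fun nh i => PySem.List.pySetD nh (mem_len - i - 1) (PySem.List.pyGetD history (turn - i - 1) 0)) new_hist
  else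
    (PySem.List.pyRange 0 mem_len 1).foldl
      (fun nh i => PySem.List.pySetD nh (mem_len - i - 1) (PySem.List.pyGetD history (turn - i - 1) 0)) new_hist

-- ===== PORT B =====
def get_last_x_moves_alt (history : List Int) (turn : Int) (mem_len : Int) : List Int :=
  (PySem.List.pyRange (turn - mem_len) turn 1).foldl
    (fun out j => out ++ [if 0 ≤ j then PySem.List.pyGetD history j 0 else -1]) []

-- ===== PRECONDITION & SPEC =====
-- Pre_ excludes exactly the inputs where A raises IndexError: turn beyond len(history) with a positive mem_len.
def Pre_get_last_x_moves (history : List Int) (turn : Int) (mem_len : Int) : Prop :=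
  turn ≤ history.length ∨ mem_len ≤ 0
instance (history : List Int) (turn : Int) (mem_len : Int) : Decidable (Pre_get_last_x_moves history turn mem_len) := by unfold Pre_get_last_x_moves; infer_instance
def pvWitness_get_last_x_moves : List Int × Int × Int := ([1, 0, 1], 3, 2)

def Spec_get_last_x_moves (history : List Int) (turn : Int) (mem_len : Int) (out : List Int) : Prop := out = get_last_x_moves_alt history turn mem_len
instance (history : List Int) (turn : Int) (mem_len : Int) (out : List Int) : Decidable (Spec_get_last_x_moves history turn mem_len out) := by unfold Spec_get_last_x_moves; infer_instance

-- ===== CLAIM (what is proved, stated in full; the proofs are below) =====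
def Claim_equal_get_last_x_moves : Prop := ∀ (history : List Int) (turn : Int) (mem_len : Int), Dom_get_last_x_moves history turn mem_len → Pre_get_last_x_moves history turn mem_len → Spec_get_last_x_moves history turn mem_len (get_last_x_moves history turn mem_len)

-- ===== LEMMAS AND PROOFS =====

-- A's back-fill loop, run k times, equals (m-k) copies of -1 followed by history[t-k : t]
lemma pv_loop_inv (history : List Int) (t m k : Nat)
    (hkt : k ≤ t) (hkm : k ≤ m) (ht : t ≤ history.length) :
    (PySem.List.pyRange 0 (k : Int) 1).foldl
      (fun nh i => PySem.List.pySetD nh ((m : Int) - i - 1) (PySem.List.pyGetD history ((t : Int) - i - 1) 0))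
      (List.replicate m (-1))
    = List.replicate (m - k) (-1) ++ (history.drop (t - k)).take k := by
  induction k with
  | zero => simp [PySem.List.pyRange]
  | succ k ih =>
    have hk : ((k : Int) + 1) = ((k + 1 : Nat) : Int) := by omega
    have hrange : PySem.List.pyRange 0 ((k + 1 : Nat) : Int) 1
        = PySem.List.pyRange 0 (k : Int) 1 ++ [(k : Int)] := by
      rw [← hk, PySem.List.pyRange_one_succ_right]; omega
    rw [hrange, List.foldl_append, ih (by omega) (by omega)]
    simp only [List.foldl_cons, List.foldl_nil]
    have hget : PySem.List.pyGetD history ((t : Int) - k - 1) 0 = history[t - k - 1]'(by omega) := by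
      have := PySem.List.pyGetD_eq_getElem (xs := history) (i := (t : Int) - k - 1) (d := 0)
        (by omega) (by omega)
      rw [this]; congr 1; omega
    have hset : ((m : Int) - k - 1) = (((m - k - 1 : Nat)) : Int) := by omega
    rw [hget, hset, PySem.List.pySetD_natCast]
    rw [List.set_append]
    have hlen : m - k - 1 < (List.replicate (m - k) (-1 : Int)).length := by
      simp; omega
    rw [if_pos hlen]
    have hrep : (List.replicate (m - k) (-1 : Int)).set (m - k - 1) (history[t - k - 1]'(by omega))
        = List.replicate (m - (k + 1)) (-1) ++ [history[t - k - 1]'(by omega)] := by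
      have : m - k = (m - (k + 1)) + 1 := by omega
      rw [this, List.replicate_succ' (n := m - (k + 1))]
      rw [List.set_append]
      simp
    have hdrop : history.drop (t - (k + 1)) = history[t - k - 1]'(by omega) :: history.drop (t - k) := by
      have h1 : t - (k + 1) < history.length := by omega
      rw [List.drop_eq_getElem_cons h1]
      congr 2
      omega
    rw [hrep, List.append_assoc, hdrop, List.take_succ_cons, List.singleton_append]

lemma pv_range_neg (t : Int) (h : t ≤ 0) : PySem.List.pyRange 0 t 1 = [] := by
  simp [PySem.List.pyRange]; omega

-- B's forward pass over range(turn-m, turn) equals the same pad-then-recent shape, k = min turn.toNat m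
lemma pv_alt_inv (history : List Int) (turn : Int) (m : Nat)
    (ht : turn ≤ history.length) :
    ((PySem.List.pyRange (turn - m) turn 1).map
      (fun j => if 0 ≤ j then PySem.List.pyGetD history j 0 else -1))
    = List.replicate (m - min turn.toNat m) (-1)
      ++ (history.drop (turn.toNat - min turn.toNat m)).take (min turn.toNat m) := by
  induction m with
  | zero =>
    rw [PySem.List.pyRange_one_eq_nil (by omega)]
    simp
  | succ m ih =>
    have hcons : PySem.List.pyRange (turn - (m + 1 : Nat)) turn 1
        = (turn - (m + 1 : Nat)) :: PySem.List.pyRange (turn - (m : Nat)) turn 1 := by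
      have h := PySem.List.pyRange_one_cons (a := turn - (m + 1 : Nat)) (b := turn) (by push_cast; omega)
      rw [h, show turn - ((m + 1 : Nat) : Int) + 1 = turn - ((m : Nat) : Int) from by push_cast; ring]
    rw [hcons, List.map_cons, ih]
    by_cases hbig : (m : Int) + 1 ≤ turn
    · -- head is a real history element
      have h0 : (0 : Int) ≤ turn - (m + 1 : Nat) := by push_cast; omega
      rw [if_pos h0]
      have hget : PySem.List.pyGetD history (turn - (m + 1 : Nat)) 0
          = history[turn.toNat - (m + 1)]'(by omega) := by
        have := PySem.List.pyGetD_eq_getElem (xs := history) (i := turn - (m + 1 : Nat)) (d := 0)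
          h0 (by omega)
        rw [this]; congr 1; omega
      have hk : min turn.toNat m = m := by omega
      have hk1 : min turn.toNat (m + 1) = m + 1 := by omega
      rw [hget, hk, hk1]
      simp only [Nat.sub_self, List.replicate_zero, List.nil_append]
      have hdrop : history.drop (turn.toNat - (m + 1))
          = history[turn.toNat - (m + 1)]'(by omega) :: history.drop (turn.toNat - m) := by
        rw [List.drop_eq_getElem_cons (by omega)]
        congr 2
        omega
      rw [hdrop, List.take_succ_cons]
    · -- head is the -1 sentinel
      have h0 : ¬ (0 : Int) ≤ turn - (m + 1 : Nat) := by push_cast; omega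
      rw [if_neg h0]
      have hk : min turn.toNat m = turn.toNat := by omega
      have hk1 : min turn.toNat (m + 1) = turn.toNat := by omega
      rw [hk, hk1]
      have : m + 1 - turn.toNat = (m - turn.toNat) + 1 := by omega
      rw [this, List.replicate_succ, List.cons_append]

-- ===== VERDICT (by name: the statement is the Claim_ definition above) =====
theorem get_last_x_moves_spec : Claim_equal_get_last_x_moves := by
  intro history turn mem_len _ hpre
  unfold Spec_get_last_x_moves get_last_x_moves get_last_x_moves_alt Pre_get_last_x_moves at *
  dsimp only
  rw [PySem.List.foldl_append_singleton_eq_map, List.nil_append]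
  by_cases hm0 : mem_len ≤ 0
  · -- mem_len ≤ 0: both sides empty
    have hA : mem_len.toNat = 0 := by omega
    have hB : PySem.List.pyRange (turn - mem_len) turn 1 = [] := by
      exact PySem.List.pyRange_one_eq_nil (by omega)
    rw [hB, List.map_nil, hA, List.replicate_zero]
    by_cases hlt : turn < mem_len
    · rw [if_pos hlt, pv_range_neg turn (by omega)]; simp
    · rw [if_neg hlt, pv_range_neg mem_len (by omega)]; simp
  · have ht : turn ≤ (history.length : Int) := by omega
    have e2 : ((mem_len.toNat : Nat) : Int) = mem_len := by omega
    rw [show turn - mem_len = turn - (mem_len.toNat : Nat) by rw [e2],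
        pv_alt_inv history turn mem_len.toNat ht]
    by_cases hlt : turn < mem_len
    · rw [if_pos hlt]
      by_cases ht0 : turn ≤ 0
      · rw [pv_range_neg turn ht0]
        have hk : min turn.toNat mem_len.toNat = 0 := by omega
        rw [hk]
        simp
      · have hloop := pv_loop_inv history turn.toNat mem_len.toNat turn.toNat
          (le_refl _) (by omega) (by omega)
        have e1 : ((turn.toNat : Nat) : Int) = turn := by omega
        rw [e1, e2] at hloop
        rw [hloop]
        have hk : min turn.toNat mem_len.toNat = turn.toNat := by omega
        rw [hk]
    · rw [if_neg hlt]
      have hloop := pv_loop_inv history turn.toNat mem_len.toNat mem_len.toNat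
        (by omega) (le_refl _) (by omega)
      have e1 : ((turn.toNat : Nat) : Int) = turn := by omega
      rw [e1, e2] at hloop
      rw [hloop]
      have hk : min turn.toNat mem_len.toNat = mem_len.toNat := by omega
      rw [hk]
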